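-- pv_equiv track=rewrite | github.com/peter/learning | languages/python/examples/lib/qualified.py | maskify2
-- ===== SOURCE A (Python) =====
-- def maskify2(cc):
--   MASK_CHAR = '#'
--   if len(cc) < 6:
--     return cc
--   mask_range = range(1, (len(cc) - 4))
--   def should_mask(i, c):
--     return c.isdigit() and i in mask_range
--   def get_char(i, c):
--     return MASK_CHAR if should_mask(i, c) else c
--   chars = [get_char(i, c) for (i, c) in enumerate(cc)]
--   return ''.join(chars)
-- ===== SOURCE B (Python) =====
-- def maskify2(cc):
--   if len(cc) < 6:
--     return cc
--   head = cc[:1]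
--   middle = cc[1:len(cc) - 4]
--   tail = cc[len(cc) - 4:]
--   masked = ''.join('#' if c.isdigit() else c for c in middle)
--   return head + masked + tail
-- ===== Notes on version B (the rewrite author's own statement) =====
-- stated objective: simpler
-- what changed: Replaces the per-index enumerate pass with a membership test in range(1, len-4) by slicing the string into head/middle/tail and masking only the middle slice's digits.
import Mathlib
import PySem

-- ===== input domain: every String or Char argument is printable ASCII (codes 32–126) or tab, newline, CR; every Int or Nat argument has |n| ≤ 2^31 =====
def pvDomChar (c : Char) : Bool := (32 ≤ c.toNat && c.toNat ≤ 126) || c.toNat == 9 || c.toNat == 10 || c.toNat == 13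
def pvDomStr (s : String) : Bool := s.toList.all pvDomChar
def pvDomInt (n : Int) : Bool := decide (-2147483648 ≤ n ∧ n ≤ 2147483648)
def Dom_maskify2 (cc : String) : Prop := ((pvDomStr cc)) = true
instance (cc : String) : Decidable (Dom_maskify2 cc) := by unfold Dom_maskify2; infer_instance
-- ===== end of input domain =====

-- B masks the middle slice cc[1:len-4] directly instead of testing each index against a range; objective: simpler.
-- ===== PORT A =====
def maskify2 (cc : String) : String :=
  if PySem.Str.len cc < 6 then cc
  else
    let maskRange := PySem.List.pyRange 1 (PySem.Str.len cc - 4) 1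
    let chars := (PySem.List.enumerate cc.toList 0).map (fun ic =>
      if PySem.Chars.isdigit ic.2 && decide (ic.1 ∈ maskRange) then '#' else ic.2)
    String.ofList chars

-- ===== PORT B =====
def maskify2_alt (cc : String) : String :=
  if PySem.Str.len cc < 6 then cc
  else
    let cs := cc.toList
    let head := PySem.List.slice cs none (some 1)
    let middle := PySem.List.slice cs (some 1) (some (PySem.Str.len cc - 4))
    let tail := PySem.List.slice cs (some (PySem.Str.len cc - 4)) none
    let masked := middle.map (fun c => if PySem.Chars.isdigit c then '#' else c)
    String.ofList (head ++ masked ++ tail)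

-- ===== PRECONDITION & SPEC =====
def Spec_maskify2 (cc : String) (out : String) : Prop := out = maskify2_alt cc
instance (cc : String) (out : String) : Decidable (Spec_maskify2 cc out) := by unfold Spec_maskify2; infer_instance

-- ===== CLAIM (what is proved, stated in full; the proofs are below) =====
def Claim_equal_maskify2 : Prop := ∀ (cc : String), Dom_maskify2 cc → Spec_maskify2 cc (maskify2 cc)

-- ===== LEMMAS AND PROOFS =====

-- segment of the enumerate loop entirely left of the mask range: every char kept
lemma mask_lo (cs : List Char) (s hi : Int) (h : s + cs.length ≤ 1) :
    (PySem.List.enumerate cs s).map (fun ic =>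
      if PySem.Chars.isdigit ic.2 && decide (ic.1 ∈ PySem.List.pyRange 1 hi 1) then '#' else ic.2) = cs := by
  induction cs generalizing s with
  | nil => simp [PySem.List.enumerate_nil]
  | cons c rest ih =>
    have hm : s ∉ PySem.List.pyRange 1 hi 1 := by
      rw [PySem.List.mem_pyRange_one]; simp at h ⊢; omega
    simp only [PySem.List.enumerate_cons, List.map_cons, decide_eq_false hm,
      Bool.and_false, Bool.false_eq_true, if_false]
    rw [ih (s + 1) (by simp at h ⊢; omega)]

-- segment entirely right of the mask range: every char kept
lemma mask_hi (cs : List Char) (s hi : Int) (h : hi ≤ s) :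
    (PySem.List.enumerate cs s).map (fun ic =>
      if PySem.Chars.isdigit ic.2 && decide (ic.1 ∈ PySem.List.pyRange 1 hi 1) then '#' else ic.2) = cs := by
  induction cs generalizing s with
  | nil => simp [PySem.List.enumerate_nil]
  | cons c rest ih =>
    have hm : s ∉ PySem.List.pyRange 1 hi 1 := by
      rw [PySem.List.mem_pyRange_one]; omega
    simp only [PySem.List.enumerate_cons, List.map_cons, decide_eq_false hm,
      Bool.and_false, Bool.false_eq_true, if_false]
    rw [ih (s + 1) (by omega)]

-- segment entirely inside the mask range: the index test is always true
lemma mask_mid (cs : List Char) (s hi : Int) (h1 : 1 ≤ s) (h2 : s + cs.length ≤ hi) :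
    (PySem.List.enumerate cs s).map (fun ic =>
      if PySem.Chars.isdigit ic.2 && decide (ic.1 ∈ PySem.List.pyRange 1 hi 1) then '#' else ic.2)
    = cs.map (fun c => if PySem.Chars.isdigit c then '#' else c) := by
  induction cs generalizing s with
  | nil => simp [PySem.List.enumerate_nil]
  | cons c rest ih =>
    have hm : s ∈ PySem.List.pyRange 1 hi 1 := by
      rw [PySem.List.mem_pyRange_one]; simp at h2; omega
    simp only [PySem.List.enumerate_cons, List.map_cons, decide_eq_true hm, Bool.and_true]
    rw [ih (s + 1) (by omega) (by simp at h2 ⊢; omega)]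

-- ===== VERDICT (by name: the statement is the Claim_ definition above) =====
theorem maskify2_spec : Claim_equal_maskify2 := by
  intro cc _
  unfold Spec_maskify2 maskify2 maskify2_alt
  rw [PySem.Str.len_eq]
  set cs := cc.toList with hcs
  set n := cs.length with hn
  by_cases h : (n : Int) < 6
  · simp [h]
  · simp only [h, if_false]
    have h6 : 6 ≤ n := by omega
    have hb : ((n : Int) - 4) = ((n - 4 : Nat) : Int) := by omega
    congr 1
    rw [hb, PySem.List.slice_to _ (by norm_num), PySem.List.slice_from _ (Int.natCast_nonneg _),
        PySem.List.slice_toNat _ (by norm_num) (Int.natCast_nonneg _)]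
    have hsplit : cs = cs.take 1 ++ ((cs.drop 1).take (n - 5) ++ cs.drop (n - 4)) := by
      have hd : (cs.drop 1).drop (n - 5) = cs.drop (n - 4) := by
        rw [List.drop_drop]; congr 1; omega
      rw [← hd, List.take_append_drop, List.take_append_drop]
    conv_lhs => rw [hsplit]
    rw [PySem.List.enumerate_append, PySem.List.enumerate_append, List.map_append, List.map_append]
    have hl1 : (cs.take 1).length = 1 := by simp [← hn]; omega
    have hl2 : ((cs.drop 1).take (n - 5)).length = n - 5 := by simp [← hn]; omega
    rw [mask_lo _ _ _ (by rw [hl1]; norm_num),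
        mask_mid _ _ _ (by rw [hl1]; norm_num) (by rw [hl1, hl2]; push_cast; omega),
        mask_hi _ _ _ (by rw [hl1, hl2]; push_cast; omega)]
    rw [show ((1 : Int).toNat) = 1 from rfl, Int.toNat_natCast,
        show n - 4 - 1 = n - 5 from by omega, List.append_assoc]
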